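-- pv_equiv track=rewrite | github.com/digitalandrew/wairz | backend/app/ai/orchestrator.py | _fix_message_alternation
-- ===== SOURCE A (Python) =====
-- def _fix_message_alternation(messages: list[dict]) -> list[dict]:
--     """Ensure messages alternate between user and assistant roles.
--
--     If trimming produces adjacent messages with the same role, drop the older
--     duplicate to maintain valid conversation structure.
--     """
--     if len(messages) <= 1:
--         return messages
--
--     fixed: list[dict] = [messages[0]]
--     for msg in messages[1:]:
--         if msg["role"] == fixed[-1]["role"]:
--             # Same role in sequence - keep the newer one (replace)
--             fixed[-1] = msg
--         else:
--             fixed.append(msg)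
--     return fixed
-- ===== SOURCE B (Python) =====
-- def _fix_message_alternation(messages: list[dict]) -> list[dict]:
--     """Ensure messages alternate: a message survives only if its successor has a
--     different role (the last message always survives)."""
--     if len(messages) <= 1:
--         return messages
--     roles = [m["role"] for m in messages]
--     kept = [m for m, r, nr in zip(messages, roles, roles[1:]) if r != nr]
--     kept.append(messages[-1])
--     return kept
-- ===== Notes on version B (the rewrite author's own statement) =====
-- stated objective: alternative
-- what changed: Replaces the accumulator loop that overwrites the last kept message with a stateless staged pass: precompute the role of every message, filter by comparing each message's role with its successor's, and append the final message unconditionally.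
import Mathlib
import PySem

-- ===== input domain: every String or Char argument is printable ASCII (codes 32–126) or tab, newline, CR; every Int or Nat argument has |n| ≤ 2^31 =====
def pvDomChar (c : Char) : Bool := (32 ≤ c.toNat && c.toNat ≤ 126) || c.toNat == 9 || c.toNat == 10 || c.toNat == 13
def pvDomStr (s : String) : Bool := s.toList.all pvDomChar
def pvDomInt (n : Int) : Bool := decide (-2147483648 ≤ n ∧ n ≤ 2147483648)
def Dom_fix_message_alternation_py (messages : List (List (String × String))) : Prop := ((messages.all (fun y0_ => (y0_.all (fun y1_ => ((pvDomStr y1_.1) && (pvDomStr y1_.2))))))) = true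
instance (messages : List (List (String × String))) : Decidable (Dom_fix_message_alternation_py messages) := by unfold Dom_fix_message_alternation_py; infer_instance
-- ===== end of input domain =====

-- ===== PORT A =====
-- B replaces A's replace-last accumulator loop by a staged pairwise filter on precomputed roles; same return value.
-- m["role"]: first-match lookup in the association list (Python dict lookup); none = KeyError (excluded by Pre_).
def pyRole (m : List (String × String)) : Option String :=
  (m.find? (fun p => p.1 == "role")).map (·.2)

def fix_message_alternation_py (messages : List (List (String × String))) : List (List (String × String)) :=
  if messages.length ≤ 1 then messages
  else
    match messages with
    | [] => messages
    | m0 :: rest =>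
      -- for msg in messages[1:]: replace fixed[-1] on equal role, else append
      rest.foldl
        (fun fixed msg =>
          if pyRole msg == pyRole (fixed.getLast?.getD []) then fixed.dropLast ++ [msg]
          else fixed ++ [msg])
        [m0]

-- ===== PORT B =====
-- roles = [m["role"] for m in messages]; keep m where zip(messages, roles, roles[1:]) gives r != nr; append messages[-1].
def fix_message_alternation_py_alt (messages : List (List (String × String))) : List (List (String × String)) :=
  if messages.length ≤ 1 then messages
  else
    let roles := messages.map pyRole
    let kept := ((messages.zip roles).zip (roles.drop 1)).filterMap
      (fun p => if p.1.2 != p.2 then some p.1.1 else none)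
    -- messages[-1]: nonempty here (length > 1), so pyGet? is some; getD [] is unreachable
    kept ++ [(PySem.List.pyGet? messages (-1)).getD []]

-- ===== PRECONDITION & SPEC =====
-- Pre_ excludes exactly the inputs where A raises KeyError: two or more messages and some message without a "role" key.
def Pre_fix_message_alternation_py (messages : List (List (String × String))) : Prop :=
  messages.length ≤ 1 ∨ (messages.all (fun m => m.any (fun p => p.1 == "role"))) = true

instance (messages : List (List (String × String))) : Decidable (Pre_fix_message_alternation_py messages) := by
  unfold Pre_fix_message_alternation_py; infer_instance

def pvWitness_fix_message_alternation_py : (List (List (String × String))) :=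
  [[("role", "u")], [("role", "u")], [("role", "a")]]

def Spec_fix_message_alternation_py (messages : List (List (String × String))) (out : List (List (String × String))) : Prop := out = fix_message_alternation_py_alt messages
instance (messages : List (List (String × String))) (out : List (List (String × String))) : Decidable (Spec_fix_message_alternation_py messages out) := by unfold Spec_fix_message_alternation_py; infer_instance

-- ===== CLAIM (what is proved, stated in full; the proofs are below) =====
def Claim_equal_fix_message_alternation_py : Prop := ∀ (messages : List (List (String × String))), Dom_fix_message_alternation_py messages → Pre_fix_message_alternation_py messages → Spec_fix_message_alternation_py messages (fix_message_alternation_py messages)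

-- ===== LEMMAS AND PROOFS =====

-- Common characterisation: the collapsed runs (last of each run of equal roles).
def altRuns : List (String × String) → List (List (String × String)) → List (List (String × String))
  | cur, [] => [cur]
  | cur, b :: rs => if pyRole b == pyRole cur then altRuns b rs else cur :: altRuns b rs

-- Loop invariant for A's fold: with accumulator pre ++ [last], the fold appends exactly the collapsed runs.
theorem foldl_altRuns (rest : List (List (String × String)))
    (pre : List (List (String × String))) (last : List (String × String)) :
    rest.foldl
        (fun fixed msg =>
          if pyRole msg == pyRole (fixed.getLast?.getD []) then fixed.dropLast ++ [msg]
          else fixed ++ [msg])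
        (pre ++ [last]) = pre ++ altRuns last rest := by
  induction rest generalizing pre last with
  | nil => simp [altRuns]
  | cons b rs ih =>
    simp only [List.foldl_cons, List.getLast?_concat, Option.getD_some, List.dropLast_concat, altRuns]
    by_cases h : (pyRole b == pyRole last) = true
    · simp only [if_pos h]
      exact ih pre b
    · simp only [if_neg h]
      have := ih (pre ++ [last]) b
      simpa [List.append_assoc] using this

-- B's pairwise filter plus appended last element is also the collapsed runs.
theorem zip_filter_altRuns (rest : List (List (String × String))) (cur : List (String × String)) :
    (((cur :: rest).zip ((cur :: rest).map pyRole)).zip (rest.map pyRole)).filterMap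
        (fun p => if p.1.2 != p.2 then some p.1.1 else none)
      ++ [((cur :: rest).getLast?).getD []] = altRuns cur rest := by
  induction rest generalizing cur with
  | nil => simp [altRuns]
  | cons b rs ih =>
    rcases eq_or_ne (pyRole b) (pyRole cur) with he | he
    · have h1 : (pyRole cur != pyRole b) = false := by simp [bne, he]
      have h2 : altRuns cur (b :: rs) = altRuns b rs := by simp [altRuns, he]
      rw [h2, ← ih b]
      simp [he]
    · have h1 : pyRole cur ≠ pyRole b := fun hc => he hc.symm
      have h2 : altRuns cur (b :: rs) = cur :: altRuns b rs := by
        simp [altRuns, beq_iff_eq, he]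
      rw [h2, ← ih b]
      simp [h1]

-- ===== VERDICT (by name: the statement is the Claim_ definition above) =====
theorem fix_message_alternation_py_spec : Claim_equal_fix_message_alternation_py := by
  intro messages _ _
  unfold Spec_fix_message_alternation_py fix_message_alternation_py fix_message_alternation_py_alt
  by_cases hlen : messages.length ≤ 1
  · simp [hlen]
  · cases messages with
    | nil => simp at hlen
    | cons m0 rest =>
      simp only [if_neg hlen]
      show rest.foldl _ [m0] = _
      have hA := foldl_altRuns rest [] m0
      have hB := zip_filter_altRuns rest m0
      simp only [List.nil_append] at hA
      rw [hA, ← hB, PySem.List.pyGet?_neg_one]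
      simp
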